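-- pv_equiv track=rewrite | github.com/MustafaJL/Sudoku_Solver- | myproject/python.py | remove_duplication_from_row
-- ===== SOURCE A (Python) =====
-- def remove_duplication_from_row(ls):
--     nw = []
--     for a in ls:
--         if a == -1:
--             nw.append(-1)
--         if a not in nw:
--             nw.append(a)
--     return nw
-- ===== SOURCE B (Python) =====
-- def remove_duplication_from_row(ls):
--     first = {}
--     for i, a in enumerate(ls):
--         if a != -1 and a not in first:
--             first[a] = i
--     return [a for i, a in enumerate(ls) if a == -1 or first[a] == i]
-- ===== Notes on version B (the rewrite author's own statement) =====
-- stated objective: alternative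
-- what changed: Replaces A's grow-as-you-go accumulator with repeated membership scans by a precomputed dict of first-occurrence indices followed by a single index-matched filter pass; it trades A's inner scans for a hash table, which pays off only when rows contain many distinct values.
import Mathlib
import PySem

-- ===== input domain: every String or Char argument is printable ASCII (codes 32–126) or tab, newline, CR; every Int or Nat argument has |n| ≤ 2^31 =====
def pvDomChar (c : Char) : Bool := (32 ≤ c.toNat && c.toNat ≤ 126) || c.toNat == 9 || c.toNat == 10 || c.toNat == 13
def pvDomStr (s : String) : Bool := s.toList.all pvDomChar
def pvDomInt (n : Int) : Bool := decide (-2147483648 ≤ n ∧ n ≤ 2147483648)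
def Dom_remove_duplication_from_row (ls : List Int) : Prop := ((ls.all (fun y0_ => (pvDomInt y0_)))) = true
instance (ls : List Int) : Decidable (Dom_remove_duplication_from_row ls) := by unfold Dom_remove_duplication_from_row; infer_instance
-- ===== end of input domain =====

-- B precomputes a dict of first-occurrence indices and filters in one index-matched pass,
-- instead of A's accumulator with repeated membership scans (objective: alternative).

-- ===== PORT A =====
-- loop body of A: the two ifs, the second one testing membership in the updated nw
def rdStepA (nw : List Int) (a : Int) : List Int :=
  let nw1 := if a = -1 then nw ++ [-1] else nw
  if a ∉ nw1 then nw1 ++ [a] else nw1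

def remove_duplication_from_row (ls : List Int) : List Int :=
  ls.foldl rdStepA []

-- ===== PORT B =====
-- loop body of B's first pass: record a non -1 value the first time it is seen
def rdStepB (d : PySem.Dict Int Int) (p : Int × Int) : PySem.Dict Int Int :=
  if p.2 ≠ -1 ∧ d.contains p.2 = false then d.insert p.2 p.1 else d

def rdFirst (ls : List Int) : PySem.Dict Int Int :=
  (PySem.List.enumerate ls).foldl rdStepB PySem.Dict.empty

def remove_duplication_from_row_alt (ls : List Int) : List Int :=
  let first := rdFirst ls
  ((PySem.List.enumerate ls).filter
      (fun p => p.2 == -1 || first.get? p.2 == some p.1)).map (·.2)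

-- ===== PRECONDITION & SPEC =====
def Spec_remove_duplication_from_row (ls : List Int) (out : List Int) : Prop := out = remove_duplication_from_row_alt ls
instance (ls : List Int) (out : List Int) : Decidable (Spec_remove_duplication_from_row ls out) := by unfold Spec_remove_duplication_from_row; infer_instance

-- ===== CLAIM (what is proved, stated in full; the proofs are below) =====
def Claim_equal_remove_duplication_from_row : Prop := ∀ (ls : List Int), Dom_remove_duplication_from_row ls → Spec_remove_duplication_from_row ls (remove_duplication_from_row ls)

-- ===== LEMMAS AND PROOFS =====

-- common reference: keep every -1, and every other value at its first occurrence
def rdCore (seen : List Int) : List Int → List Int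
  | [] => []
  | a :: t =>
      if a = -1 then -1 :: rdCore seen t
      else if a ∈ seen then rdCore seen t
      else a :: rdCore (a :: seen) t

theorem foldA_eq_core (t : List Int) : ∀ (nw seen : List Int),
    (∀ x : Int, x ≠ -1 → (x ∈ nw ↔ x ∈ seen)) →
    t.foldl rdStepA nw = nw ++ rdCore seen t := by
  induction t with
  | nil => intro nw seen _; simp [rdCore]
  | cons a t ih =>
    intro nw seen h
    by_cases ha : a = -1
    · subst ha
      have hstep : rdStepA nw (-1) = nw ++ [-1] := by simp [rdStepA]
      rw [List.foldl_cons, hstep,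
        ih (nw ++ [-1]) seen (by intro x hx; simp [List.mem_append, h x hx, hx])]
      simp [rdCore]
    · by_cases hs : a ∈ seen
      · have hin : a ∈ nw := (h a ha).2 hs
        have hstep : rdStepA nw a = nw := by simp [rdStepA, ha, hin]
        rw [List.foldl_cons, hstep, ih nw seen h]
        simp [rdCore, ha, hs]
      · have hnin : a ∉ nw := fun hc => hs ((h a ha).1 hc)
        have hstep : rdStepA nw a = nw ++ [a] := by simp [rdStepA, ha, hnin]
        rw [List.foldl_cons, hstep,
          ih (nw ++ [a]) (a :: seen) (by
            intro x hx
            simp only [List.mem_append, List.mem_cons, h x hx]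
            tauto)]
        simp [rdCore, ha, hs]

theorem foldB_stable (t : List (Int × Int)) : ∀ (d : PySem.Dict Int Int) (a j : Int),
    d.get? a = some j → (t.foldl rdStepB d).get? a = some j := by
  induction t with
  | nil => intro d a j h; simpa using h
  | cons p t ih =>
    intro d a j h
    rw [List.foldl_cons]
    apply ih
    unfold rdStepB
    split_ifs with hc
    · have hnone : d.get? p.2 = none := (PySem.Dict.get?_eq_none_iff_contains d p.2).2 hc.2
      have hne : a ≠ p.2 := by intro he; rw [← he, h] at hnone; cases hnone
      rw [PySem.Dict.get?_insert_of_ne _ _ hne]; exact h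
    · exact h

theorem foldB_first (t : List Int) : ∀ (k : Int) (d : PySem.Dict Int Int) (a : Int),
    a ≠ -1 → d.contains a = false → a ∈ t →
    ((PySem.List.enumerate t k).foldl rdStepB d).get? a = some (k + (t.idxOf a : Int)) := by
  induction t with
  | nil => intro _ _ _ _ _ h; exact absurd h (List.not_mem_nil)
  | cons b t ih =>
    intro k d a ha hc hmem
    rw [PySem.List.enumerate_cons, List.foldl_cons]
    by_cases hb : b = a
    · subst hb
      have hstep : rdStepB d (k, b) = d.insert b k := by simp [rdStepB, ha, hc]
      rw [hstep]
      have := foldB_stable (PySem.List.enumerate t (k + 1)) (d.insert b k) b k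
        (PySem.Dict.get?_insert_self _ _ _)
      rw [this]
      simp [List.idxOf_cons_self]
    · have hmem' : a ∈ t := by
        rcases List.mem_cons.1 hmem with h | h
        · exact absurd h.symm hb
        · exact h
      have hc' : (rdStepB d (k, b)).contains a = false := by
        unfold rdStepB
        split_ifs with h
        · have hab : (a == b) = false := beq_eq_false_iff_ne.2 (fun he => hb he.symm)
          rw [PySem.Dict.contains_insert, hab, Bool.false_or]
          exact hc
        · exact hc
      rw [ih (k + 1) (rdStepB d (k, b)) a ha hc' hmem']
      rw [List.idxOf_cons_ne t hb]
      congr 1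
      push_cast
      ring

theorem filterB_eq_core (t : List Int) : ∀ (k : Int) (seen : List Int) (F : PySem.Dict Int Int),
    (∀ a : Int, a ≠ -1 → a ∈ seen → ∃ j, F.get? a = some j ∧ j < k) →
    (∀ a : Int, a ≠ -1 → a ∉ seen → a ∈ t → F.get? a = some (k + (t.idxOf a : Int))) →
    ((PySem.List.enumerate t k).filter
        (fun p => p.2 == -1 || F.get? p.2 == some p.1)).map (·.2) = rdCore seen t := by
  induction t with
  | nil => intro _ _ _ _ _; simp [rdCore]
  | cons a t ih =>
    intro k seen F h1 h2
    rw [PySem.List.enumerate_cons]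
    by_cases ha : a = -1
    · subst ha
      have hrec := ih (k + 1) seen F
        (by intro x hx hs; obtain ⟨j, hj, hjk⟩ := h1 x hx hs; exact ⟨j, hj, by omega⟩)
        (by
          intro x hx hs hmem
          have hxne : x ≠ -1 := hx
          have := h2 x hx hs (List.mem_cons_of_mem _ hmem)
          rw [this]
          rw [List.idxOf_cons_ne t (fun h => hxne h.symm)]
          congr 1; push_cast; ring)
      simp only [List.filter_cons]
      rw [if_pos (by simp), List.map_cons, hrec]
      simp [rdCore]
    · by_cases hs : a ∈ seen
      · obtain ⟨j, hj, hjk⟩ := h1 a ha hs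
        have hcond : (((k, a)).2 == (-1 : Int) || F.get? ((k, a)).2 == some ((k, a)).1) = false := by
          simp only []
          rw [hj]
          simp [ha, show j ≠ k by omega]
        have hrec := ih (k + 1) seen F
          (by intro x hx hxs; obtain ⟨j', hj', hjk'⟩ := h1 x hx hxs; exact ⟨j', hj', by omega⟩)
          (by
            intro x hx hxs hmem
            have hxa : x ≠ a := fun he => hxs (he ▸ hs)
            have := h2 x hx hxs (List.mem_cons_of_mem _ hmem)
            rw [this]
            rw [List.idxOf_cons_ne t (fun h => hxa h.symm)]
            congr 1; push_cast; ring)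
        simp only [List.filter_cons, hcond, if_false, Bool.false_eq_true]
        rw [hrec]
        simp [rdCore, ha, hs]
      · have hj := h2 a ha hs (List.mem_cons_self)
        have hidx : (a :: t).idxOf a = 0 := List.idxOf_cons_self
        rw [hidx] at hj
        simp only [Nat.cast_zero, add_zero] at hj
        have hcond : (((k, a)).2 == (-1 : Int) || F.get? ((k, a)).2 == some ((k, a)).1) = true := by
          simp only []
          rw [hj]; simp
        have hrec := ih (k + 1) (a :: seen) F
          (by
            intro x hx hxs
            rcases List.mem_cons.1 hxs with he | hxs'
            · subst he; exact ⟨k, hj, by omega⟩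
            · obtain ⟨j', hj', hjk'⟩ := h1 x hx hxs'; exact ⟨j', hj', by omega⟩)
          (by
            intro x hx hxs hmem
            have hxa : x ≠ a := fun he => hxs (he ▸ List.mem_cons_self)
            have hxs' : x ∉ seen := fun h => hxs (List.mem_cons_of_mem _ h)
            have := h2 x hx hxs' (List.mem_cons_of_mem _ hmem)
            rw [this]
            rw [List.idxOf_cons_ne t (fun h => hxa h.symm)]
            congr 1; push_cast; ring)
        simp only [List.filter_cons, hcond, if_true]
        rw [List.map_cons, hrec]
        simp [rdCore, ha, hs]

theorem A_eq_core (ls : List Int) : remove_duplication_from_row ls = rdCore [] ls := by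
  unfold remove_duplication_from_row
  simpa using foldA_eq_core ls [] [] (by simp)

theorem B_eq_core (ls : List Int) : remove_duplication_from_row_alt ls = rdCore [] ls := by
  unfold remove_duplication_from_row_alt
  exact filterB_eq_core ls 0 [] (rdFirst ls)
    (by intro x _ hx; exact absurd hx (List.not_mem_nil))
    (by
      intro x hx _ hmem
      unfold rdFirst
      have := foldB_first ls 0 PySem.Dict.empty x hx (PySem.Dict.contains_empty x) hmem
      simpa using this)

-- ===== VERDICT (by name: the statement is the Claim_ definition above) =====
theorem remove_duplication_from_row_spec : Claim_equal_remove_duplication_from_row := by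
  intro ls _
  unfold Spec_remove_duplication_from_row
  rw [A_eq_core, B_eq_core]
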